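-- pv_equiv track=rewrite | github.com/patrickweaver/diy-encryption | server.py | find_spaces
-- ===== SOURCE A (Python) =====
-- def find_spaces(my_possible_strings, include_e_a, how_many):
--   spaces_list = []
--   for i in range(0, len(my_possible_strings)):
--     spaces = 0
--     for c in my_possible_strings[i]:
--       if ord(c) == 32:
--         spaces += 1
--       if (include_e_a):
--         if ord(c) == 101 or ord(c) == 97:
--           spaces += 1
--     spaces_list.append({"spaces": spaces, "index": i})
--
--   spaces_list = sorted(spaces_list, key=lambda k: k["spaces"], reverse=True)
--
--
--   most_likely_indexes = []
--   for i in range(0, how_many):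
--     most_likely_indexes.append(spaces_list[i]["index"])
--
--   return most_likely_indexes
-- ===== SOURCE B (Python) =====
-- def find_spaces(my_possible_strings, include_e_a, how_many):
--   # Partial selection: repeatedly extract the first maximal index (top-k by
--   # repeated argmax), instead of building records and fully sorting them.
--   counts = []
--   for s in my_possible_strings:
--     c = 0
--     for ch in s:
--       if ch == ' ' or (include_e_a and (ch == 'e' or ch == 'a')):
--         c += 1
--     counts.append(c)
--   remaining = list(range(len(counts)))
--   result = []
--   for _ in range(how_many):
--     best = max(remaining, key=counts.__getitem__)
--     result.append(best)
--     remaining.remove(best)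
--   return result
-- ===== Notes on version B (the rewrite author's own statement) =====
-- stated objective: alternative
-- what changed: Replaces A's build-records-then-stable-descending-sort-then-slice pipeline by top-k partial selection: repeatedly extract the first maximal remaining index with max(remaining, key=counts) and delete it from the pool, so no record list is ever built or sorted; not faster, and slower when how_many is large.
import Mathlib
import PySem

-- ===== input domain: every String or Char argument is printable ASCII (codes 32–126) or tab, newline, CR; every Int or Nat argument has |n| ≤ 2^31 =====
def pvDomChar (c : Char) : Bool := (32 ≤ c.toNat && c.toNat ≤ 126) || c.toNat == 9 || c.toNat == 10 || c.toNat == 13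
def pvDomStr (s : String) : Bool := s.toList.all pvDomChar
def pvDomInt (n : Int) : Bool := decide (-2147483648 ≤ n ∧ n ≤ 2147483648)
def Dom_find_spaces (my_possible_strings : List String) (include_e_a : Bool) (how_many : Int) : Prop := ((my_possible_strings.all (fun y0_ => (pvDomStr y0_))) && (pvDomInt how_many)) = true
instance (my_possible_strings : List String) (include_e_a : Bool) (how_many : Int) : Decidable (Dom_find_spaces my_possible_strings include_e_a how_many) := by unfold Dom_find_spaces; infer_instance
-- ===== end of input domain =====

-- B replaces A's build-records / stable-descending-sort / slice pipeline by top-k partial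
-- selection (repeated first-argmax extraction with deletion): an alternative algorithm
-- (not claimed faster), proved to return the identical list.

-- ===== PORT A =====
-- the inner character loop of A: +1 per space, and (when include_e_a) +1 per 'e'/'a'
def pvSpacesA (include_e_a : Bool) (s : String) : Int :=
  s.toList.foldl (fun spaces c =>
    let spaces := if c.toNat == 32 then spaces + 1 else spaces
    if include_e_a then
      (if c.toNat == 101 || c.toNat == 97 then spaces + 1 else spaces)
    else spaces) 0

def find_spaces (my_possible_strings : List String) (include_e_a : Bool) (how_many : Int) : List Int :=
  -- the dict {"spaces": s, "index": i} has two fixed keys: ported as the pair (s, i)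
  let spaces_list : List (Int × Int) :=
    (PySem.List.pyRange 0 (my_possible_strings.length : Int)).foldl
      (fun acc i => acc ++ [(pvSpacesA include_e_a (PySem.List.pyGetD my_possible_strings i ""), i)]) []
  let spaces_list := PySem.List.sorted spaces_list (fun k => k.1) true
  -- spaces_list[i] raises IndexError when how_many > len: excluded by Pre_; the default (0, 0) is never read inside Pre_
  (PySem.List.pyRange 0 how_many).foldl
    (fun acc i => acc ++ [(PySem.List.pyGetD spaces_list i (0, 0)).2]) []

-- ===== PORT B =====
-- B's inner character loop: one combined condition per character
def pvCountB (include_e_a : Bool) (s : String) : Int :=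
  s.toList.foldl (fun c ch =>
    if ch == ' ' || (include_e_a && (ch == 'e' || ch == 'a')) then c + 1 else c) 0

-- one iteration of B's selection loop: best = max(remaining, key=counts); append; remove.
-- The none branches are where Python raises (max/remove on failure): excluded by Pre_.
def pvSelectStep (counts : List Int) (st : List Int × List Int) (_i : Int) : List Int × List Int :=
  match PySem.List.max? st.1 (fun i => PySem.List.pyGetD counts i 0) with
  | none => st
  | some best =>
    match PySem.List.remove? st.1 best with
    | none => (st.1, st.2 ++ [best])
    | some rem => (rem, st.2 ++ [best])

def find_spaces_alt (my_possible_strings : List String) (include_e_a : Bool) (how_many : Int) : List Int :=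
  let counts := my_possible_strings.foldl (fun acc s => acc ++ [pvCountB include_e_a s]) []
  let remaining := PySem.List.pyRange 0 (counts.length : Int)
  ((PySem.List.pyRange 0 how_many).foldl (pvSelectStep counts) (remaining, [])).2

-- ===== PRECONDITION & SPEC =====
-- Pre_ excludes exactly how_many > len(my_possible_strings), where A raises IndexError
-- (and B raises ValueError from max of an empty sequence).
def Pre_find_spaces (my_possible_strings : List String) (include_e_a : Bool) (how_many : Int) : Prop :=
  how_many ≤ (my_possible_strings.length : Int)
instance (my_possible_strings : List String) (include_e_a : Bool) (how_many : Int) : Decidable (Pre_find_spaces my_possible_strings include_e_a how_many) := by unfold Pre_find_spaces; infer_instance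

def pvWitness_find_spaces : List String × Bool × Int := (["a b c", "ee", "x", " "], true, 3)

def Spec_find_spaces (my_possible_strings : List String) (include_e_a : Bool) (how_many : Int) (out : List Int) : Prop := out = find_spaces_alt my_possible_strings include_e_a how_many
instance (my_possible_strings : List String) (include_e_a : Bool) (how_many : Int) (out : List Int) : Decidable (Spec_find_spaces my_possible_strings include_e_a how_many out) := by unfold Spec_find_spaces; infer_instance

-- ===== CLAIM (what is proved, stated in full; the proofs are below) =====
def Claim_equal_find_spaces : Prop := ∀ (my_possible_strings : List String) (include_e_a : Bool) (how_many : Int), Dom_find_spaces my_possible_strings include_e_a how_many → Pre_find_spaces my_possible_strings include_e_a how_many → Spec_find_spaces my_possible_strings include_e_a how_many (find_spaces my_possible_strings include_e_a how_many)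

-- ===== LEMMAS AND PROOFS =====

-- a character equals a literal character iff its code point equals that literal's code
theorem pvCharEq (c : Char) (n : Nat) (c' : Char) (hn : c'.toNat = n) : (c.toNat == n) = (c == c') := by
  rcases c with ⟨⟨⟨v, hv⟩⟩, h⟩
  rcases c' with ⟨⟨⟨v', hv'⟩⟩, h'⟩
  simp [Char.toNat, BEq.beq, Char.ext_iff, UInt32.ext_iff] at *
  omega

-- the two per-string counters agree (a character is never both a space and an 'e'/'a')
theorem pvCount_eq (include_e_a : Bool) (s : String) :
    pvSpacesA include_e_a s = pvCountB include_e_a s := by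
  unfold pvSpacesA pvCountB
  congr 1
  funext a c
  rw [pvCharEq c 32 ' ' rfl, pvCharEq c 101 'e' rfl, pvCharEq c 97 'a' rfl]
  by_cases h1 : c = ' ' <;> by_cases h2 : c = 'e' <;> by_cases h3 : c = 'a' <;> simp_all

-- the order A's stable descending sort realises on (count, index) pairs with distinct
-- increasing indices: larger count first, ties by smaller index
def pvPrec (a b : Int × Int) : Prop := b.1 < a.1 ∨ (a.1 = b.1 ∧ a.2 < b.2)

-- inserting a pair whose index is largest preserves pvPrec-sortedness
theorem pvInsertBy_stable (x : Int × Int) (L : List (Int × Int))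
    (hL : L.Pairwise pvPrec) (hx : ∀ y ∈ L, y.2 < x.2) :
    (PySem.List.insertBy (fun a b => decide (b.1 < a.1)) x L).Pairwise pvPrec := by
  induction L with
  | nil => simp [PySem.List.insertBy]
  | cons y ys ih =>
    rw [List.pairwise_cons] at hL
    obtain ⟨hy_ys, hys⟩ := hL
    by_cases hb : y.1 < x.1
    · simp only [PySem.List.insertBy, hb, decide_true, if_true]
      refine List.Pairwise.cons ?_ (List.Pairwise.cons hy_ys hys)
      intro z hz
      rcases List.mem_cons.1 hz with rfl | hz'
      · exact Or.inl hb
      · rcases hy_ys z hz' with h | ⟨h1, _⟩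
        · exact Or.inl (lt_trans h hb)
        · exact Or.inl (h1 ▸ hb)
    · simp only [PySem.List.insertBy, hb, decide_false, Bool.false_eq_true, if_false]
      refine List.Pairwise.cons ?_ (ih hys (fun z hz => hx z (List.mem_cons_of_mem y hz)))
      intro z hz
      rcases (PySem.List.mem_insertBy _ _ _ _).1 hz with rfl | hz'
      · rcases lt_or_eq_of_le (le_of_not_gt hb) with h | h
        · exact Or.inl h
        · exact Or.inr ⟨h.symm, hx y (List.mem_cons_self)⟩
      · exact hy_ys z hz'

-- A's stable reverse sort of a snd-increasing pair list is pvPrec-sorted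
theorem pvSorted_stable (ps : List (Int × Int)) (h : ps.Pairwise (fun a b => a.2 < b.2)) :
    (PySem.List.sorted ps (fun p => p.1) true).Pairwise pvPrec := by
  induction ps using List.reverseRecOn with
  | nil => simp [PySem.List.sorted_rev_eq_foldl_insertBy]
  | append_singleton ps x ih =>
    rw [List.pairwise_append] at h
    obtain ⟨h1, _, hcross⟩ := h
    rw [PySem.List.sorted_rev_eq_foldl_insertBy, List.foldl_append, List.foldl_cons,
        List.foldl_nil, ← PySem.List.sorted_rev_eq_foldl_insertBy]
    exact pvInsertBy_stable x _ (ih h1)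
      (fun y hy => hcross y ((PySem.List.mem_sorted _ _ _ _).1 hy) x (List.mem_cons_self))

-- max?'s fold step, named so the proofs can speak about partial folds
def pvMaxStep (k : Int → Int) (acc : Option Int) (x : Int) : Option Int :=
  match acc with
  | none => some x
  | some m => if k m < k x then some x else some m

theorem pvMax?_eq_foldl (k : Int → Int) (l : List Int) :
    PySem.List.max? l k = l.foldl (pvMaxStep k) none := by
  unfold PySem.List.max?
  congr 1
  funext acc x
  cases acc <;> rfl

theorem pvMaxFold_keep (k : Int → Int) (m : Int) (l : List Int)
    (h : ∀ y ∈ l, ¬ k m < k y) : l.foldl (pvMaxStep k) (some m) = some m := by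
  induction l with
  | nil => rfl
  | cons y ys ih =>
    have : pvMaxStep k (some m) y = some m := by
      simp [pvMaxStep, h y (List.mem_cons_self)]
    rw [List.foldl_cons, this]
    exact ih (fun z hz => h z (List.mem_cons_of_mem y hz))

-- Python's max returns the FIRST maximal element: strictly smaller keys before m,
-- keys ≤ after m, gives m
theorem pvMax?_split (k : Int → Int) (l1 l2 : List Int) (m : Int)
    (h1 : ∀ y ∈ l1, k y < k m) (h2 : ∀ y ∈ l2, k y ≤ k m) :
    PySem.List.max? (l1 ++ m :: l2) k = some m := by
  rw [pvMax?_eq_foldl, List.foldl_append, List.foldl_cons]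
  have hstep : pvMaxStep k (l1.foldl (pvMaxStep k) none) m = some m := by
    rcases hm1 : l1.foldl (pvMaxStep k) none with _ | m1
    · rfl
    · have hmem : m1 ∈ l1 := PySem.List.max?_mem (by rw [pvMax?_eq_foldl]; exact hm1)
      simp [pvMaxStep, h1 m1 hmem]
  rw [hstep]
  exact pvMaxFold_keep k m l2 (fun y hy => not_lt_of_ge (h2 y hy))

-- indexing a prefix: [l[i] for i in range(t)] is l.take t
theorem pvMap_pyGetD_take {α : Type} (l : List α) (d : α) (t : Nat) (h : t ≤ l.length) :
    (PySem.List.pyRange 0 (t : Int)).map (fun i => PySem.List.pyGetD l i d) = l.take t := by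
  apply List.ext_getElem
  · simp [PySem.List.length_pyRange_one]; omega
  · intro j hj1 hj2
    have hjt : j < t := by
      simpa [PySem.List.length_pyRange_one] using hj1
    simp only [List.getElem_map, PySem.List.getElem_pyRange_one, List.getElem_take]
    rw [PySem.List.pyGetD_eq_getElem l d (by omega) (by omega)]
    congr 1
    omega

-- range(0, hm) only depends on max(hm, 0)
theorem pvPyRange_toNat (hm : Int) :
    PySem.List.pyRange 0 hm = PySem.List.pyRange 0 (hm.toNat : Int) := by
  rcases Int.lt_or_le hm 0 with h | h
  · rw [PySem.List.pyRange_one_eq_nil (by omega), PySem.List.pyRange_one_eq_nil (by omega)]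
  · rw [Int.toNat_of_nonneg h]

-- CORE INVARIANT of B's selection loop: after t extractions the result is the index
-- projection of the first t elements of A's sorted list S, and the remaining pool is the
-- other indices in increasing order
theorem pvSelect_loop (counts : List Int) (S : List (Int × Int))
    (hform : ∀ p ∈ S, p = (PySem.List.pyGetD counts p.2 0, p.2))
    (hprec : S.Pairwise pvPrec)
    (hperm : (S.map Prod.snd).Perm (PySem.List.pyRange 0 (counts.length : Int)))
    (t : Nat) (ht : t ≤ S.length) :
    (PySem.List.pyRange 0 (t : Int)).foldl (pvSelectStep counts)
        (PySem.List.pyRange 0 (counts.length : Int), [])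
    = ((PySem.List.pyRange 0 (counts.length : Int)).filter
          (fun i => decide (i ∉ (S.take t).map Prod.snd)),
       (S.take t).map Prod.snd) := by
  induction t with
  | zero =>
    have h0 : PySem.List.pyRange 0 ((0 : Nat) : Int) = [] :=
      PySem.List.pyRange_one_eq_nil (by omega)
    rw [h0]
    simp
  | succ t ih =>
    have ht' : t < S.length := ht
    have hcast : ((t + 1 : Nat) : Int) = (t : Int) + 1 := by omega
    rw [hcast, PySem.List.pyRange_one_succ_right (by omega), List.foldl_append,
        ih (le_of_lt ht'), List.foldl_cons, List.foldl_nil]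
    -- notation
    set m : Int := (S[t]'ht').2 with hm
    set T : List Int := (S.take t).map Prod.snd with hT
    set R : List Int := (PySem.List.pyRange 0 (counts.length : Int)).filter
        (fun i => decide (i ∉ T)) with hR
    have hSt : S[t]'ht' = (PySem.List.pyGetD counts m 0, m) :=
      hform _ (List.getElem_mem ht')
    -- S's index projection has no duplicates
    have hndS : (S.map Prod.snd).Nodup :=
      (hperm.nodup_iff).2 (PySem.List.nodup_pyRange_one _ _)
    -- m is not among the already-taken indices
    have hmT : m ∉ T := by
      intro hmem
      have hsplit : S.map Prod.snd = T ++ (S.drop t).map Prod.snd := by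
        rw [hT, ← List.map_append, List.take_append_drop]
      have hmd : m ∈ (S.drop t).map Prod.snd := by
        rw [List.drop_eq_getElem_cons ht']
        exact List.mem_cons_self
      rw [hsplit, List.nodup_append] at hndS
      exact hndS.2.2 m hmem m hmd rfl
    -- m is in the remaining pool
    have hmS : m ∈ S.map Prod.snd := List.mem_map_of_mem (List.getElem_mem ht')
    have hmR : m ∈ R := by
      rw [hR, List.mem_filter]
      exact ⟨hperm.mem_iff.1 hmS, by simpa using hmT⟩
    -- every other remaining index has key ≤ key m, with ties only at larger indices
    have hbound : ∀ j ∈ R, j ≠ m →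
        PySem.List.pyGetD counts j 0 ≤ PySem.List.pyGetD counts m 0 ∧
        (PySem.List.pyGetD counts j 0 = PySem.List.pyGetD counts m 0 → m < j) := by
      intro j hjR hjm
      rw [hR, List.mem_filter] at hjR
      obtain ⟨hjrange, hjT⟩ := hjR
      have hjT' : j ∉ T := by simpa using hjT
      have hjS : j ∈ S.map Prod.snd := hperm.mem_iff.2 hjrange
      obtain ⟨q, hqS, hqj⟩ := List.mem_map.1 hjS
      have hqform : q = (PySem.List.pyGetD counts j 0, j) := by
        rw [hform q hqS, hqj]
      -- q sits strictly after position t in S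
      have hqdrop : q ∈ S.drop (t + 1) := by
        have hq' : q ∈ S.take t ++ S.drop t := by rw [List.take_append_drop]; exact hqS
        rcases List.mem_append.1 hq' with hq1 | hq2
        · exact absurd (hqj ▸ List.mem_map_of_mem hq1) hjT'
        · rw [List.drop_eq_getElem_cons ht'] at hq2
          rcases List.mem_cons.1 hq2 with rfl | hq3
          · exact absurd (hm.trans hqj) (fun hmj => hjm hmj.symm)
          · exact hq3
      have hdropPW : (S.drop t).Pairwise pvPrec := hprec.drop
      rw [List.drop_eq_getElem_cons ht', List.pairwise_cons] at hdropPW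
      have hprec' : pvPrec (S[t]'ht') q := hdropPW.1 q hqdrop
      rw [hSt, hqform] at hprec'
      rcases hprec' with h | ⟨h1, h2⟩
      · exact ⟨le_of_lt h, fun he => absurd he (ne_of_lt h)⟩
      · exact ⟨le_of_eq h1.symm, fun _ => h2⟩
    -- remaining pool: strictly increasing and duplicate-free
    have hpwR : R.Pairwise (· < ·) :=
      (PySem.List.pairwise_lt_pyRange_one 0 _).filter _
    have hndR : R.Nodup := (PySem.List.nodup_pyRange_one 0 _).filter _
    -- split the pool at m and compute the argmax
    obtain ⟨A1, A2, hRsplit⟩ := List.append_of_mem hmR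
    have hmax : PySem.List.max? R (fun i => PySem.List.pyGetD counts i 0) = some m := by
      rw [hRsplit]
      have hndm : m ∉ A1 ∧ m ∉ A2 := by
        rw [hRsplit, List.nodup_append] at hndR
        refine ⟨fun h => hndR.2.2 m h m List.mem_cons_self rfl, fun h => (List.nodup_cons.1 hndR.2.1).1 h⟩
      apply pvMax?_split
      · intro y hy
        have hym : y ≠ m := fun he => hndm.1 (he ▸ hy)
        have hyR : y ∈ R := by rw [hRsplit]; exact List.mem_append_left _ hy
        have hylt : y < m := by
          rw [hRsplit, List.pairwise_append] at hpwR
          exact hpwR.2.2 y hy m List.mem_cons_self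
        rcases lt_or_eq_of_le (hbound y hyR hym).1 with h | h
        · exact h
        · exact absurd ((hbound y hyR hym).2 h) (by omega)
      · intro y hy
        have hym : y ≠ m := fun he => hndm.2 (he ▸ hy)
        have hyR : y ∈ R := by
          rw [hRsplit]
          exact List.mem_append_right _ (List.mem_cons_of_mem m hy)
        exact (hbound y hyR hym).1
    -- the step extracts m and appends it
    have hrm : PySem.List.remove? R m = some (R.erase m) :=
      PySem.List.remove?_eq_some_erase R m hmR
    have hTnew : (S.take (t + 1)).map Prod.snd = T ++ [m] := by
      rw [List.take_add_one, List.getElem?_eq_getElem ht', List.map_append, hT]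
      rfl
    have hRnew : R.erase m = (PySem.List.pyRange 0 (counts.length : Int)).filter
        (fun i => decide (i ∉ (S.take (t + 1)).map Prod.snd)) := by
      rw [hndR.erase_eq_filter m, hR, List.filter_filter, hTnew]
      apply List.filter_congr
      intro i _
      by_cases him : i = m <;> by_cases hiT : i ∈ T <;> simp [him, hiT]
    simp only [pvSelectStep, hmax, hrm, hTnew, hRnew]

-- ===== VERDICT (by name: the statement is the Claim_ definition above) =====
set_option maxHeartbeats 1000000 in
theorem find_spaces_spec : Claim_equal_find_spaces := by
  intro xs iea hm _ hpre
  show find_spaces xs iea hm = find_spaces_alt xs iea hm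
  -- shared notation: the counts, the (count, index) pairs, A's sorted list S
  set counts : List Int := xs.map (pvCountB iea) with hcounts
  set ps : List (Int × Int) :=
    (PySem.List.pyRange 0 (xs.length : Int)).map
      (fun i => (PySem.List.pyGetD counts i 0, i)) with hps
  set S : List (Int × Int) := PySem.List.sorted ps (fun p => p.1) true with hS
  have hlenS : S.length = xs.length := by
    rw [hS, PySem.List.length_sorted, hps, List.length_map, PySem.List.length_pyRange_one]
    omega
  have hpre' : hm ≤ (xs.length : Int) := hpre
  have htle : hm.toNat ≤ S.length := by
    rw [hlenS]; omega
  -- A's side: the slice of the sorted list's index projection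
  have hA : find_spaces xs iea hm = (S.take hm.toNat).map Prod.snd := by
    simp only [find_spaces]
    have hfold1 :
        (PySem.List.pyRange 0 (xs.length : Int)).map
          (fun i => (pvSpacesA iea (PySem.List.pyGetD xs i ""), i)) = ps := by
      rw [hps]
      apply List.map_congr_left
      intro i _
      have h0 : pvCountB iea "" = 0 := rfl
      rw [pvCount_eq, hcounts, ← h0, PySem.List.pyGetD_map (pvCountB iea) xs i ""]
    rw [PySem.List.foldl_append_singleton_eq_map, List.nil_append,
        PySem.List.foldl_append_singleton_eq_map, List.nil_append, hfold1, ← hS]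
    have hsnd : ∀ i : Int,
        (PySem.List.pyGetD S i ((0 : Int), (0 : Int))).2
          = PySem.List.pyGetD (S.map Prod.snd) i 0 :=
      fun i => (PySem.List.pyGetD_map Prod.snd S i ((0 : Int), (0 : Int))).symm
    calc (PySem.List.pyRange 0 hm).map
          (fun i => (PySem.List.pyGetD S i ((0 : Int), (0 : Int))).2)
        = (PySem.List.pyRange 0 (hm.toNat : Int)).map
            (fun i => PySem.List.pyGetD (S.map Prod.snd) i 0) := by
          rw [pvPyRange_toNat]
          exact List.map_congr_left (fun i _ => hsnd i)
      _ = (S.map Prod.snd).take hm.toNat :=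
          pvMap_pyGetD_take (S.map Prod.snd) 0 hm.toNat (by rw [List.length_map]; exact htle)
      _ = (S.take hm.toNat).map Prod.snd := (List.map_take ..).symm
  -- B's side: the selection loop, via its invariant
  have hB : find_spaces_alt xs iea hm = (S.take hm.toNat).map Prod.snd := by
    simp only [find_spaces_alt]
    rw [PySem.List.foldl_append_singleton_eq_map, List.nil_append, ← hcounts, pvPyRange_toNat hm]
    rw [pvSelect_loop counts S ?hform ?hprec ?hperm hm.toNat htle]
    case hform =>
      intro p hp
      rw [hS, PySem.List.mem_sorted, hps] at hp
      obtain ⟨i, _, rfl⟩ := List.mem_map.1 hp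
      rfl
    case hprec =>
      rw [hS]
      apply pvSorted_stable
      rw [hps]
      exact (PySem.List.pairwise_lt_pyRange_one 0 _).map _ (fun a b h => h)
    case hperm =>
      have h1 : (S.map Prod.snd).Perm (ps.map Prod.snd) :=
        (PySem.List.sorted_perm ps (fun p => p.1) true).map Prod.snd
      have h2 : ps.map Prod.snd = PySem.List.pyRange 0 (counts.length : Int) := by
        rw [hps, List.map_map, hcounts, List.length_map]
        simp [Function.comp_def]
      exact h2 ▸ h1
  rw [hA, hB]
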